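-- pv_equiv track=rewrite | github.com/Alan-Robertson/equs_2021_demo | src/convex/convex.py | convex_combs
-- ===== SOURCE A (Python) =====
-- def convex_combs(collection:list, n_terms:int) -> list:
--     '''
--         convex_combs
--         A generator that produces convex combinations
--         :: collection : list :: A list of objects to take combinations of
--         :: n_terms    : int  :: The number of objects in the combination
--         No elements of the collection are modified
--         Yields combinations
--     '''
--     base = len(collection)
--
--     if n_terms <= 0:
--         return
--
--     for i in range(base ** (n_terms - 1), base ** n_terms):
--
--         current_combination = []
--         integer_rep = i
--
--         current_power = 1
--         while current_power <= n_terms: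
--
--             current_combination.append(
--                 collection[
--                     int(integer_rep % (base ** current_power) // (base ** (current_power - 1))
--                 )])
--
--             integer_rep -= integer_rep % (base ** current_power)
--             current_power += 1
--         yield current_combination
-- ===== SOURCE B (Python) =====
-- def convex_combs(collection, n_terms):
--     '''Recursive product enumeration (odometer style): build each combination
--     directly by recursing over digit positions, most-significant digit in the
--     outer loop (restricted to nonzero for the leading position), instead of
--     encoding/decoding integer indices with power arithmetic.'''
--     if n_terms <= 0:
--         return
--
--     def rec(k, leading):
--         if k == 0:
--             yield []
--             return
--         for j in range(1 if leading else 0, len(collection)):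
--             for rest in rec(k - 1, False):
--                 yield rest + [collection[j]]
--
--     yield from rec(n_terms, True)
-- ===== Notes on version B (the rewrite author's own statement) =====
-- stated objective: alternative
-- what changed: B enumerates the product recursively over digit positions (odometer/itertools.product style, leading digit restricted to nonzero), building each combination directly, instead of A's iteration over an integer range with per-digit decoding via large powers, mod and floordiv.
import Mathlib
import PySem

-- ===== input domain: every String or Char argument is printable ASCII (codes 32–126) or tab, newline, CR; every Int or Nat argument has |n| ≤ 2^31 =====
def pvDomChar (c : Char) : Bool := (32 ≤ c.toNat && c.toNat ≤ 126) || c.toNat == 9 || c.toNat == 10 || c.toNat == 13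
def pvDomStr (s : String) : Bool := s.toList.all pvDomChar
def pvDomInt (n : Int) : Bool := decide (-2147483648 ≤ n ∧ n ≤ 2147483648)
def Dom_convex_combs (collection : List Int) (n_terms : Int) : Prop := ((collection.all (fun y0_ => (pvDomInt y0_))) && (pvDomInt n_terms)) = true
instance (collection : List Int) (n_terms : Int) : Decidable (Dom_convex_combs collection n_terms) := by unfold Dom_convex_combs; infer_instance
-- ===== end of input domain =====

-- B builds each combination by direct recursive product enumeration over digit positions
-- (leading digit nonzero) instead of A's integer-range iteration with per-digit power/mod/
-- floordiv decoding; same output lists in the same order.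


-- ===== PORT A =====
-- A's inner while-loop: fuel = number of remaining guard-true iterations (n_terms.toNat at entry,
-- power goes 1..n_terms), state = (current_power, integer_rep, current_combination).
-- collection[...] is ported as pyGetD with default 0: the index is always in range
-- (0 ≤ digit < base) whenever the loop body runs, so Python never raises here.
def convexCombsInner (collection : List Int) (base n_terms : Int) :
    Nat → Int → Int → List Int → List Int
  | 0, _, _, acc => acc
  | fuel + 1, current_power, integer_rep, acc =>
    if current_power ≤ n_terms then
      convexCombsInner collection base n_terms fuel (current_power + 1)
        (integer_rep - PySem.Int.mod integer_rep (base ^ current_power.toNat))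
        (acc ++ [PySem.List.pyGetD collection
          (PySem.Int.floordiv (PySem.Int.mod integer_rep (base ^ current_power.toNat))
            (base ^ (current_power - 1).toNat)) 0])
    else acc

def convex_combs (collection : List Int) (n_terms : Int) : List (List Int) :=
  let base : Int := (collection.length : Int)
  if n_terms ≤ 0 then []
  else
    (PySem.List.pyRange (base ^ (n_terms - 1).toNat) (base ^ n_terms.toNat) 1).map
      (fun i => convexCombsInner collection base n_terms n_terms.toNat 1 i [])

-- ===== PORT B =====
-- B's recursive generator rec(k, leading): outer loop over the most-significant digit j
-- (from 1 when leading, else 0), inner loop over the length-(k-1) tails, yield rest + [collection[j]].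
def convexAltRec (collection : List Int) : Nat → Bool → List (List Int)
  | 0, _ => [[]]
  | k + 1, leading =>
    (PySem.List.pyRange (if leading then 1 else 0) (collection.length : Int) 1).flatMap
      (fun j => (convexAltRec collection k false).map
        (fun rest => rest ++ [PySem.List.pyGetD collection j 0]))

def convex_combs_alt (collection : List Int) (n_terms : Int) : List (List Int) :=
  if n_terms ≤ 0 then [] else convexAltRec collection n_terms.toNat true

-- ===== PRECONDITION & SPEC =====
def Spec_convex_combs (collection : List Int) (n_terms : Int) (out : List (List Int)) : Prop := out = convex_combs_alt collection n_terms
instance (collection : List Int) (n_terms : Int) (out : List (List Int)) : Decidable (Spec_convex_combs collection n_terms out) := by unfold Spec_convex_combs; infer_instance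

-- ===== CLAIM (what is proved, stated in full; the proofs are below) =====
def Claim_equal_convex_combs : Prop := ∀ (collection : List Int) (n_terms : Int), Dom_convex_combs collection n_terms → Spec_convex_combs collection n_terms (convex_combs collection n_terms)

-- ===== LEMMAS AND PROOFS =====

-- Proof-side bridge: the little-endian digit decoding of an index (k divmod steps).
def digitsFn (collection : List Int) (base : Int) : Nat → Int → List Int
  | 0, _ => []
  | k + 1, q =>
    PySem.List.pyGetD collection (PySem.Int.mod q base) 0
      :: digitsFn collection base k (PySem.Int.floordiv q base)

-- Invariant for A's loop: at guard-check with current_power = cp, A's integer_rep equals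
-- q * base^(cp-1); the remaining iterations produce exactly digitsFn fuel q.
theorem convexCombsInner_eq_digits (collection : List Int) (base n_terms : Int)
    (hb : 0 < base) :
    ∀ (fuel : Nat) (cp q : Int) (acc : List Int), 1 ≤ cp → cp + (fuel : Int) = n_terms + 1 →
      convexCombsInner collection base n_terms fuel cp (q * base ^ (cp - 1).toNat) acc
        = acc ++ digitsFn collection base fuel q := by
  intro fuel
  induction fuel with
  | zero =>
    intro cp q acc _ _
    simp [convexCombsInner, digitsFn]
  | succ fuel ih =>
    intro cp q acc hcp hsum
    have hle : cp ≤ n_terms := by push_cast at hsum ⊢; omega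
    have hk : cp.toNat = (cp - 1).toNat + 1 := by omega
    set k := (cp - 1).toNat with hkdef
    have hP : (0:Int) < base ^ k := pow_pos hb k
    have hPB : (0:Int) < base ^ k * base := mul_pos hP hb
    have hpowcp : base ^ cp.toNat = base ^ k * base := by rw [hk, pow_succ]
    have hm : PySem.Int.mod (q * base ^ k) (base ^ cp.toNat) = q % base * base ^ k := by
      rw [hpowcp, PySem.Int.mod_eq_emod_of_pos hPB]
      calc q * base ^ k % (base ^ k * base)
          = base ^ k * q % (base ^ k * base) := by ring_nf
        _ = base ^ k * (q % base) := Int.mul_emod_mul_of_pos _ _ hP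
        _ = q % base * base ^ k := by ring
    have hidx : PySem.Int.floordiv (q % base * base ^ k) (base ^ k) = PySem.Int.mod q base := by
      rw [PySem.Int.floordiv_eq_ediv_of_pos hP, PySem.Int.mod_eq_emod_of_pos hb]
      exact Int.mul_ediv_cancel _ (ne_of_gt hP)
    have hrep : q * base ^ k - q % base * base ^ k
        = PySem.Int.floordiv q base * base ^ ((cp + 1) - 1).toNat := by
      have hq : q % base = q - base * (q / base) := by
        have := Int.mul_ediv_add_emod q base; omega
      have : ((cp + 1) - 1).toNat = k + 1 := by omega
      rw [this, PySem.Int.floordiv_eq_ediv_of_pos hb, pow_succ, hq]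
      ring
    rw [show convexCombsInner collection base n_terms (fuel + 1) cp (q * base ^ k) acc
        = if cp ≤ n_terms then
            convexCombsInner collection base n_terms fuel (cp + 1)
              (q * base ^ k - PySem.Int.mod (q * base ^ k) (base ^ cp.toNat))
              (acc ++ [PySem.List.pyGetD collection
                (PySem.Int.floordiv (PySem.Int.mod (q * base ^ k) (base ^ cp.toNat))
                  (base ^ (cp - 1).toNat)) 0])
          else acc from rfl, if_pos hle, hm, ← hkdef, hidx, hrep,
      ih (cp + 1) (PySem.Int.floordiv q base) _ (by omega) (by push_cast at hsum ⊢; omega)]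
    simp [digitsFn]

-- Peeling the most-significant digit: for 0 ≤ j < base and 0 ≤ r < base^k,
-- digitsFn (k+1) (j*base^k + r) = digitsFn k r ++ [collection[j]].
theorem digitsFn_shift (collection : List Int) (base : Int) (hb : 0 < base) :
    ∀ (k : Nat) (j r : Int), 0 ≤ j → j < base → 0 ≤ r → r < base ^ k →
      digitsFn collection base (k + 1) (j * base ^ k + r)
        = digitsFn collection base k r ++ [PySem.List.pyGetD collection j 0] := by
  intro k
  induction k with
  | zero =>
    intro j r h0 hj hr0 hr1
    have hb0 : base ^ 0 = 1 := pow_zero base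
    have hr : r = 0 := by omega
    subst hr
    have hmod : PySem.Int.mod j base = j := by
      rw [PySem.Int.mod_eq_emod_of_pos hb]
      exact Int.emod_eq_of_lt h0 hj
    simp [digitsFn, hmod]
  | succ k ih =>
    intro j r h0 hj hr0 hr1
    have hP : (0:Int) < base ^ k := pow_pos hb k
    have hsplit : j * base ^ (k + 1) + r = (r + (j * base ^ k) * base) := by
      rw [pow_succ]; ring
    have hmod : PySem.Int.mod (j * base ^ (k + 1) + r) base = PySem.Int.mod r base := by
      rw [PySem.Int.mod_eq_emod_of_pos hb, PySem.Int.mod_eq_emod_of_pos hb, hsplit,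
        Int.add_mul_emod_self_right]
    have hdiv : PySem.Int.floordiv (j * base ^ (k + 1) + r) base
        = j * base ^ k + PySem.Int.floordiv r base := by
      rw [PySem.Int.floordiv_eq_ediv_of_pos hb, PySem.Int.floordiv_eq_ediv_of_pos hb, hsplit,
        Int.add_mul_ediv_right _ _ (ne_of_gt hb)]
      ring
    have hq0 : 0 ≤ r / base := Int.ediv_nonneg hr0 (le_of_lt hb)
    have hq1 : r / base < base ^ k := by
      have : r < base ^ k * base := by rw [← pow_succ]; exact hr1
      exact Int.ediv_lt_of_lt_mul hb this
    rw [show digitsFn collection base (k + 1 + 1) (j * base ^ (k + 1) + r)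
        = PySem.List.pyGetD collection (PySem.Int.mod (j * base ^ (k + 1) + r) base) 0
          :: digitsFn collection base (k + 1)
            (PySem.Int.floordiv (j * base ^ (k + 1) + r) base) from rfl,
      hmod, hdiv, ih j (PySem.Int.floordiv r base) h0 hj
        (by rwa [PySem.Int.floordiv_eq_ediv_of_pos hb])
        (by rwa [PySem.Int.floordiv_eq_ediv_of_pos hb])]
    rw [show digitsFn collection base (k + 1) r
        = PySem.List.pyGetD collection (PySem.Int.mod r base) 0
          :: digitsFn collection base k (PySem.Int.floordiv r base) from rfl]
    simp

-- The block [j*base^k, (j+1)*base^k) decodes to the k-digit tails each suffixed with collection[j].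
theorem blockMap (collection : List Int) (base : Int) (hb : 0 < base) (k : Nat)
    (j : Int) (h0 : 0 ≤ j) (hj : j < base) :
    (PySem.List.pyRange (j * base ^ k) ((j + 1) * base ^ k) 1).map
        (digitsFn collection base (k + 1))
      = ((PySem.List.pyRange 0 (base ^ k) 1).map (digitsFn collection base k)).map
          (fun rest => rest ++ [PySem.List.pyGetD collection j 0]) := by
  have hP : (0:Int) < base ^ k := pow_pos hb k
  rw [PySem.List.pyRange_one, PySem.List.pyRange_one]
  have hlen : ((j + 1) * base ^ k - j * base ^ k).toNat = (base ^ k - 0).toNat := by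
    have : (j + 1) * base ^ k - j * base ^ k = base ^ k := by ring
    rw [this]; simp
  rw [hlen]
  simp only [List.map_map, List.map_map]
  refine List.map_congr_left (fun m hm => ?_)
  have hmlt : (m : Int) < base ^ k := by
    have := List.mem_range.1 hm
    omega
  have := digitsFn_shift collection base hb k j (m : Int) h0 hj (by positivity) hmlt
  simpa using this

-- Splitting [lo*base^k, (lo+n)*base^k) into n consecutive blocks.
theorem rangeFlat (collection : List Int) (base : Int) (hb : 0 < base) (k : Nat) :
    ∀ (n : Nat) (lo : Int), 0 ≤ lo → lo + n ≤ base →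
      (PySem.List.pyRange (lo * base ^ k) ((lo + n) * base ^ k) 1).map
          (digitsFn collection base (k + 1))
        = (PySem.List.pyRange lo (lo + n) 1).flatMap
            (fun j => ((PySem.List.pyRange 0 (base ^ k) 1).map (digitsFn collection base k)).map
              (fun rest => rest ++ [PySem.List.pyGetD collection j 0])) := by
  intro n
  induction n with
  | zero =>
    intro lo h0 hhi
    simp [PySem.List.pyRange_one_eq_nil]
  | succ n ih =>
    intro lo h0 hhi
    have hP : (0:Int) < base ^ k := pow_pos hb k
    have hsplit : PySem.List.pyRange (lo * base ^ k) ((lo + (n + 1 : Nat)) * base ^ k) 1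
        = PySem.List.pyRange (lo * base ^ k) ((lo + 1) * base ^ k) 1
          ++ PySem.List.pyRange ((lo + 1) * base ^ k) ((lo + (n + 1 : Nat)) * base ^ k) 1 := by
      refine PySem.List.pyRange_one_append _ _ _ ?_ ?_
      · nlinarith
      · have : lo + 1 ≤ lo + (n + 1 : Nat) := by push_cast; omega
        nlinarith
    have hcons : PySem.List.pyRange lo (lo + (n + 1 : Nat)) 1
        = lo :: PySem.List.pyRange (lo + 1) (lo + (n + 1 : Nat)) 1 :=
      PySem.List.pyRange_one_cons (by push_cast; omega)
    have hshift : (lo + 1) + (n : Int) = lo + (n + 1 : Nat) := by push_cast; omega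
    rw [hsplit, List.map_append,
      blockMap collection base hb k lo h0 (by push_cast at hhi; omega), hcons]
    have ihh := ih (lo + 1) (by omega) (by push_cast at hhi ⊢; omega)
    rw [hshift] at ihh
    rw [ihh]
    simp [List.flatMap_cons]

-- The recursive enumeration equals the decoded range, non-leading and leading forms.
theorem convexAltRec_false (collection : List Int) (hb : 0 < (collection.length : Int)) :
    ∀ (k : Nat), convexAltRec collection k false
      = (PySem.List.pyRange 0 ((collection.length : Int) ^ k) 1).map
          (digitsFn collection (collection.length : Int) k) := by
  intro k
  induction k with
  | zero =>
    simp [convexAltRec, digitsFn]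
  | succ k ih =>
    rw [show convexAltRec collection (k + 1) false
        = (PySem.List.pyRange 0 (collection.length : Int) 1).flatMap
            (fun j => (convexAltRec collection k false).map
              (fun rest => rest ++ [PySem.List.pyGetD collection j 0])) from rfl, ih]
    have := rangeFlat collection (collection.length : Int) hb k collection.length 0
      le_rfl (by simp)
    simp only [zero_add, zero_mul] at this
    rw [← this]
    congr 1
    rw [pow_succ]
    ring_nf

theorem convexAltRec_true (collection : List Int) (hb : 0 < (collection.length : Int)) (k : Nat) :
    convexAltRec collection (k + 1) true
      = (PySem.List.pyRange ((collection.length : Int) ^ k) ((collection.length : Int) ^ (k + 1)) 1).map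
          (digitsFn collection (collection.length : Int) (k + 1)) := by
  rw [show convexAltRec collection (k + 1) true
      = (PySem.List.pyRange 1 (collection.length : Int) 1).flatMap
          (fun j => (convexAltRec collection k false).map
            (fun rest => rest ++ [PySem.List.pyGetD collection j 0])) from rfl,
    convexAltRec_false collection hb k]
  have hlen1 : 1 ≤ collection.length := by exact_mod_cast hb
  have hmain := rangeFlat collection (collection.length : Int) hb k (collection.length - 1) 1
    (by omega) (by push_cast [hlen1]; omega)
  have h1 : (1:Int) + ((collection.length - 1 : Nat) : Int) = (collection.length : Int) := by
    push_cast [hlen1]; ring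
  rw [h1, one_mul] at hmain
  rw [show ((collection.length : Int)) ^ (k + 1)
      = (collection.length : Int) * (collection.length : Int) ^ k from by rw [pow_succ]; ring]
  exact hmain.symm

theorem convex_combs_eq_alt (collection : List Int) (n_terms : Int) :
    convex_combs collection n_terms = convex_combs_alt collection n_terms := by
  unfold convex_combs convex_combs_alt
  by_cases hn : n_terms ≤ 0
  · simp [hn]
  · simp only [if_neg hn]
    have hn1 : 1 ≤ n_terms := by omega
    have htn : n_terms.toNat = (n_terms - 1).toNat + 1 := by omega
    rcases Nat.eq_zero_or_pos collection.length with h0 | hpos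
    · -- empty collection: A's range is empty, B's outer loop range(1, 0) is empty
      have hb0 : ((collection.length : Int)) = 0 := by exact_mod_cast h0
      rw [hb0, htn]
      have : (0:Int) ^ ((n_terms - 1).toNat + 1) = 0 := by simp
      rw [this, PySem.List.pyRange_one_eq_nil (by positivity)]
      rw [show convexAltRec collection ((n_terms - 1).toNat + 1) true
          = (PySem.List.pyRange 1 (collection.length : Int) 1).flatMap
              (fun j => (convexAltRec collection (n_terms - 1).toNat false).map
                (fun rest => rest ++ [PySem.List.pyGetD collection j 0])) from rfl,
        hb0, PySem.List.pyRange_one_eq_nil (by norm_num)]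
      simp
    · have hb : (0:Int) < (collection.length : Int) := by exact_mod_cast hpos
      rw [htn, convexAltRec_true collection hb (n_terms - 1).toNat]
      refine List.map_congr_left (fun i hi => ?_)
      have := convexCombsInner_eq_digits collection (collection.length : Int) n_terms hb
        n_terms.toNat 1 i [] le_rfl (by omega)
      rw [htn] at this
      simpa using this

-- ===== VERDICT (by name: the statement is the Claim_ definition above) =====
theorem convex_combs_spec : Claim_equal_convex_combs := by
  intro collection n_terms _
  exact convex_combs_eq_alt collection n_terms
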